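-- pv_equiv track=rewrite | github.com/pypi-data/pypi-mirror-274 | packages/py-allspice/py_allspice-3.1.0-py3-none-any.whl/allspice/utils/bom_generation.py | _group_entries
-- ===== SOURCE A (Python) =====
-- QUANTITY_COLUMN_NAME = "Quantity"
--
-- BomEntry = dict[str, str]
--
-- def _group_entries(
--     components: list[BomEntry],
--     group_by: list[str] | None = None,
-- ) -> list[BomEntry]:
--     """
--     Group components based on a list of columns. The order of the columns in the
--     list will determine the order of the grouping.
--
--     :returns: A list of rows which can be used as the BOM.
--     """
--
--     # If grouping is off, we just add a quantity of 1 to each component and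
--     # return early.
--     if group_by is None:
--         for component in components:
--             component[QUANTITY_COLUMN_NAME] = "1"
--         return components
--
--     grouped_components = {}
--     for component in components:
--         key = tuple(component[column] for column in group_by)
--         if key in grouped_components:
--             grouped_components[key].append(component)
--         else:
--             grouped_components[key] = [component]
--
--     rows = []
--
--     for components in grouped_components.values():
--         row = {}
--         for column in group_by:
--             # The RHS here shouldn't fail as we've validated the group by
--             # columns are all in the column selection.
--             row[column] = components[0][column]
--         non_group_by = set(components[0].keys()) - set(group_by)
--         for column in non_group_by:
--             # For each of the values in the non-group-by columns, we take the
--             # unique values from all the components and join them with a comma.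
--             # This is better than taking the non-unique values and joining them
--             # with a comma, because it means a user wouldn't have to group by
--             # more columns than they want to.
--             row[column] = ", ".join(
--                 # dict.fromkeys retains the insertion order; set doesn't.
--                 dict.fromkeys(str(component[column]) for component in components).keys()
--             )
--         row["Quantity"] = str(len(components))
--         rows.append(row)
--
--     return rows
-- ===== SOURCE B (Python) =====
-- QUANTITY_COLUMN_NAME = "Quantity"
--
-- BomEntry = dict[str, str]
--
--
-- def _group_entries(
--     components: list[BomEntry],
--     group_by: list[str] | None = None,
-- ) -> list[BomEntry]:
--     """
--     Single-pass grouping: instead of collecting the full list of components per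
--     key and aggregating in a second pass, keep per key only (first component,
--     count, per-column ordered-unique accumulators) and fold each component into
--     that record as it is seen.
--     """
--
--     if group_by is None:
--         for component in components:
--             component[QUANTITY_COLUMN_NAME] = "1"
--         return components
--
--     records = {}
--     for component in components:
--         key = tuple(component[column] for column in group_by)
--         if key in records:
--             first, count, acc = records[key]
--             for column, values in acc.items():
--                 values[str(component[column])] = None
--             records[key] = (first, count + 1, acc)
--         else:
--             records[key] = (
--                 component,
--                 1,
--                 {
--                     column: {str(component[column]): None}
--                     for column in set(component.keys()) - set(group_by)
--                 },
--             )
--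
--     rows = []
--     for first, count, acc in records.values():
--         row = {column: first[column] for column in group_by}
--         for column, values in acc.items():
--             row[column] = ", ".join(values)
--         row["Quantity"] = str(count)
--         rows.append(row)
--     return rows
-- ===== Notes on version B (the rewrite author's own statement) =====
-- stated objective: alternative
-- what changed: B replaces A's two-phase design (first collect the full list of components per group key, then re-traverse each list once per non-group-by column to aggregate) with a single fused pass that keeps per key only a record (first component, count, one ordered-unique value accumulator per non-group-by column) and emits rows straight from the records, never materialising the per-group component lists.
import Mathlib
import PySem

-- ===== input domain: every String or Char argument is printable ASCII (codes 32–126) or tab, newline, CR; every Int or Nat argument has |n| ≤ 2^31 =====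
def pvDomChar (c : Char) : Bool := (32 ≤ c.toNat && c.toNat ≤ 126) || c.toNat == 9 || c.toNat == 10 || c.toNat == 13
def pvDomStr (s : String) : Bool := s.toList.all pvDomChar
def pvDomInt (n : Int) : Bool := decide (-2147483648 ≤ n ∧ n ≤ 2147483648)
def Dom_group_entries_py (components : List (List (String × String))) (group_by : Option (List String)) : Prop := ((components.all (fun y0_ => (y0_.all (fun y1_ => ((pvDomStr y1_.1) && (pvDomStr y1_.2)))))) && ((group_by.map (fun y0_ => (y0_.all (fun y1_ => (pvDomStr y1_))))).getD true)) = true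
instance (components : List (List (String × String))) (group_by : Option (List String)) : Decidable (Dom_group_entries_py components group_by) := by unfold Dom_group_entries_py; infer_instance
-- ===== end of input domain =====

-- B fuses A's two passes (group into lists, then aggregate each list) into one pass keeping per key
-- only (first component, count, per-column ordered-unique value accumulators). Return-value
-- equivalence only: with group_by = None both Pythons mutate `components` in place identically.

-- ===== PORT A =====
-- component[col]; returns "" exactly where Python raises KeyError (such inputs are excluded by Pre_)
def pvAval (c : List (String × String)) (col : String) : String :=
  (PySem.Dict.mk c).getD col ""

-- key = tuple(component[column] for column in group_by)
def pvAkey (gb : List String) (c : List (String × String)) : List String :=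
  gb.map (fun col => pvAval c col)

-- one iteration of A's grouping loop: append to the key's list, or start a new singleton list
def pvAstep (gb : List String) (d : PySem.Dict (List String) (List (List (String × String)))) (c : List (String × String)) : PySem.Dict (List String) (List (List (String × String))) :=
  if d.contains (pvAkey gb c) then d.modify (pvAkey gb c) [] (fun comps => comps ++ [c])
  else d.insert (pvAkey gb c) [c]

-- body of A's second loop: build one output row from a group's full component list
-- (the non-group-by set is iterated in first-insertion order; row dicts are compared as dicts)
def pvArow (gb : List String) (comps : List (List (String × String))) : List (String × String) :=
  let c0 := comps.headD []
  let row1 := gb.foldl (fun r col => r.insert col (pvAval c0 col)) (PySem.Dict.mk [])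
  let nonGB := PySem.Set.diff (PySem.Set.ofList (c0.map Prod.fst)) (PySem.Set.ofList gb)
  let row2 := nonGB.foldl (fun r col => r.insert col (PySem.Str.join ", " (PySem.List.dedup (comps.map (fun c => pvAval c col))))) row1
  (row2.insert "Quantity" (PySem.Int.toStr (comps.length : Int))).items

def group_entries_py (components : List (List (String × String))) (group_by : Option (List String)) : List (List (String × String)) :=
  match group_by with
  | none => components.map (fun c => ((PySem.Dict.mk c).insert "Quantity" "1").items)
  | some gb =>
    let grouped := components.foldl (pvAstep gb) (PySem.Dict.mk [])
    grouped.items.foldl (fun rows kv => rows ++ [pvArow gb kv.2]) []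

-- ===== PORT B =====
-- component[col]; returns "" exactly where Python raises KeyError (excluded by Pre_)
def pvBval (c : List (String × String)) (col : String) : String :=
  (PySem.Dict.mk c).getD col ""

def pvBkey (gb : List String) (c : List (String × String)) : List String :=
  gb.map (fun col => pvBval c col)

-- first sight of a key: record = (first component, count 1, one singleton accumulator per non-group-by column)
def pvBinit (gb : List String) (c : List (String × String)) : (List (String × String)) × Int × PySem.Dict String (List String) :=
  (c, 1, PySem.Dict.mk ((PySem.Set.diff (PySem.Set.ofList (c.map Prod.fst)) (PySem.Set.ofList gb)).map (fun col => (col, ([pvBval c col] : List String)))))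

-- repeat key: bump the count, add this component's value to every column accumulator
def pvBupd (c : List (String × String)) (r : (List (String × String)) × Int × PySem.Dict String (List String)) : (List (String × String)) × Int × PySem.Dict String (List String) :=
  (r.1, r.2.1 + 1, PySem.Dict.mk (r.2.2.items.map (fun p => (p.1, PySem.Set.add p.2 (pvBval c p.1)))))

-- one iteration of B's single pass (the default record is never used: the key is present)
def pvBstep (gb : List String) (d : PySem.Dict (List String) ((List (String × String)) × Int × PySem.Dict String (List String))) (c : List (String × String)) : PySem.Dict (List String) ((List (String × String)) × Int × PySem.Dict String (List String)) :=
  if d.contains (pvBkey gb c) then d.modify (pvBkey gb c) ([], 0, PySem.Dict.mk []) (pvBupd c)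
  else d.insert (pvBkey gb c) (pvBinit gb c)

-- emit one row straight from a record (no second traversal of the components)
def pvBrow (gb : List String) (r : (List (String × String)) × Int × PySem.Dict String (List String)) : List (String × String) :=
  let row1 := gb.foldl (fun d col => d.insert col (pvBval r.1 col)) (PySem.Dict.mk [])
  let row2 := r.2.2.items.foldl (fun d p => d.insert p.1 (PySem.Str.join ", " p.2)) row1
  (row2.insert "Quantity" (PySem.Int.toStr r.2.1)).items

def group_entries_py_alt (components : List (List (String × String))) (group_by : Option (List String)) : List (List (String × String)) :=
  match group_by with
  | none => components.map (fun c => ((PySem.Dict.mk c).insert "Quantity" "1").items)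
  | some gb =>
    let records := components.foldl (pvBstep gb) (PySem.Dict.mk [])
    records.items.foldl (fun rows kv => rows ++ [pvBrow gb kv.2]) []

-- ===== PRECONDITION & SPEC =====
def pvPreVal (c : List (String × String)) (col : String) : String :=
  (PySem.Dict.mk c).getD col ""

def pvPreKey (gb : List String) (c : List (String × String)) : List String :=
  gb.map (fun col => pvPreVal c col)

def pvPreOk (components : List (List (String × String))) (gb : List String) : Bool :=
  components.all (fun c => gb.all (fun g => (c.map Prod.fst).contains g)) &&
  components.all (fun c =>
    (((components.filter (fun c' => pvPreKey gb c' == pvPreKey gb c)).headD []).map Prod.fst).all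
      (fun k => gb.contains k || (c.map Prod.fst).contains k))

-- Pre_ excludes exactly the inputs where the Python A raises KeyError: with group_by = some gb, a
-- component missing one of the gb columns, or a component missing a non-group-by column of its
-- group's first component.
def Pre_group_entries_py (components : List (List (String × String))) (group_by : Option (List String)) : Prop :=
  (group_by.all (pvPreOk components)) = true
instance (components : List (List (String × String))) (group_by : Option (List String)) : Decidable (Pre_group_entries_py components group_by) := by unfold Pre_group_entries_py; infer_instance

def pvWitness_group_entries_py : (List (List (String × String))) × Option (List String) :=
  ([[("Name", "R1"), ("Value", "10")], [("Name", "R1"), ("Value", "12")], [("Name", "C3"), ("Value", "10")]], some ["Name"])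

def Spec_group_entries_py (components : List (List (String × String))) (group_by : Option (List String)) (out : List (List (String × String))) : Prop := out = group_entries_py_alt components group_by
instance (components : List (List (String × String))) (group_by : Option (List String)) (out : List (List (String × String))) : Decidable (Spec_group_entries_py components group_by out) := by unfold Spec_group_entries_py; infer_instance

-- ===== CLAIM (what is proved, stated in full; the proofs are below) =====
def Claim_equal_group_entries_py : Prop := ∀ (components : List (List (String × String))) (group_by : Option (List String)), Dom_group_entries_py components group_by → Pre_group_entries_py components group_by → Spec_group_entries_py components group_by (group_entries_py components group_by)

-- ===== LEMMAS AND PROOFS =====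

-- B's record summarising a (nonempty) group list of A
def pvSum (gb : List String) : List (List (String × String)) → (List (String × String)) × Int × PySem.Dict String (List String)
  | [] => ([], 0, PySem.Dict.mk [])
  | c0 :: rest => rest.foldl (fun r c => pvBupd c r) (pvBinit gb c0)

-- A's grouping dict with every group list summarised into B's record
def pvMapV (gb : List String) (d : PySem.Dict (List String) (List (List (String × String)))) : PySem.Dict (List String) ((List (String × String)) × Int × PySem.Dict String (List String)) :=
  PySem.Dict.mk (d.items.map (fun p => (p.1, pvSum gb p.2)))

theorem pvSum_append (gb : List String) (c0 : List (String × String)) (rest : List (List (String × String))) (c : List (String × String)) :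
    pvSum gb ((c0 :: rest) ++ [c]) = pvBupd c (pvSum gb (c0 :: rest)) := by
  simp [pvSum, List.foldl_append]

theorem pvSum_first (l : List (List (String × String))) (r : (List (String × String)) × Int × PySem.Dict String (List String)) :
    (l.foldl (fun r c => pvBupd c r) r).1 = r.1 := by
  induction l generalizing r with
  | nil => rfl
  | cons c l ih => rw [List.foldl_cons, ih]; simp [pvBupd]

theorem pvSum_count (l : List (List (String × String))) (r : (List (String × String)) × Int × PySem.Dict String (List String)) :
    (l.foldl (fun r c => pvBupd c r) r).2.1 = r.2.1 + l.length := by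
  induction l generalizing r with
  | nil => simp
  | cons c l ih => rw [List.foldl_cons, ih]; simp [pvBupd]; omega

theorem pvSum_acc (l : List (List (String × String))) (r : (List (String × String)) × Int × PySem.Dict String (List String)) :
    (l.foldl (fun r c => pvBupd c r) r).2.2.items
      = r.2.2.items.map (fun p => (p.1, l.foldl (fun s c => PySem.Set.add s (pvBval c p.1)) p.2)) := by
  induction l generalizing r with
  | nil => simp
  | cons c l ih => rw [List.foldl_cons, ih]; simp [pvBupd, List.map_map, Function.comp]

theorem pvMapV_contains (gb : List String) (d : PySem.Dict (List String) (List (List (String × String)))) (k : List String) :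
    (pvMapV gb d).contains k = d.contains k := by
  simp [pvMapV, PySem.Dict.contains, List.any_map, Function.comp_def]

theorem pvMapV_get? (gb : List String) (d : PySem.Dict (List String) (List (List (String × String)))) (k : List String) :
    (pvMapV gb d).get? k = (d.get? k).map (pvSum gb) := by
  simp [pvMapV, PySem.Dict.get?, List.find?_map, Function.comp_def, Option.map_map]

theorem pvMapV_insert (gb : List String) (d : PySem.Dict (List String) (List (List (String × String)))) (k : List String) (v : List (List (String × String))) :
    (pvMapV gb d).insert k (pvSum gb v) = pvMapV gb (d.insert k v) := by
  apply PySem.Dict.ext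
  by_cases h : d.contains k = true
  · rw [show (pvMapV gb (d.insert k v)).items = (d.insert k v).items.map (fun p => (p.1, pvSum gb p.2)) from rfl,
        PySem.Dict.items_insert_of_contains d _ h,
        PySem.Dict.items_insert_of_contains (pvMapV gb d) _ (by rw [pvMapV_contains]; exact h),
        show (pvMapV gb d).items = d.items.map (fun p => (p.1, pvSum gb p.2)) from rfl,
        List.map_map, List.map_map]
    refine List.map_congr_left (fun p _ => ?_)
    by_cases hp : p.1 = k <;> simp [hp]
  · rw [show (pvMapV gb (d.insert k v)).items = (d.insert k v).items.map (fun p => (p.1, pvSum gb p.2)) from rfl,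
        PySem.Dict.items_insert_of_not_contains d _ (by simp [h]),
        PySem.Dict.items_insert_of_not_contains (pvMapV gb d) _ (by rw [pvMapV_contains]; simp [h]),
        List.map_append]
    rfl

theorem pvAstep_nonempty (gb : List String) (d : PySem.Dict (List String) (List (List (String × String)))) (c : List (String × String))
    (h : ∀ p ∈ d.items, p.2 ≠ []) : ∀ p ∈ (pvAstep gb d c).items, p.2 ≠ [] := by
  intro p hp
  unfold pvAstep at hp
  split at hp
  · unfold PySem.Dict.modify at hp
    rcases (PySem.Dict.mem_items_insert _ _ _ _).1 hp with h1 | h1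
    · subst h1; simp
    · exact h p h1.1
  · rcases (PySem.Dict.mem_items_insert _ _ _ _).1 hp with h1 | h1
    · subst h1; simp
    · exact h p h1.1

theorem pvStep_eq (gb : List String) (d : PySem.Dict (List String) (List (List (String × String)))) (c : List (String × String))
    (h : ∀ p ∈ d.items, p.2 ≠ []) :
    pvBstep gb (pvMapV gb d) c = pvMapV gb (pvAstep gb d c) := by
  have hk : pvBkey gb c = pvAkey gb c := rfl
  unfold pvBstep pvAstep
  rw [hk, pvMapV_contains]
  by_cases hc : d.contains (pvAkey gb c) = true
  · simp only [hc, if_true]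
    obtain ⟨v, hv⟩ : ∃ v, d.get? (pvAkey gb c) = some v := by
      rw [PySem.Dict.contains_eq_isSome_get?] at hc
      exact Option.isSome_iff_exists.1 hc
    have hvne : v ≠ [] := h (pvAkey gb c, v) (PySem.Dict.mem_items_of_get?_eq_some d hv)
    obtain ⟨c0, rest, rfl⟩ : ∃ c0 rest, v = c0 :: rest := by
      cases v with
      | nil => exact absurd rfl hvne
      | cons a b => exact ⟨a, b, rfl⟩
    rw [PySem.Dict.modify, PySem.Dict.modify]
    rw [PySem.Dict.getD_eq_get?_getD, PySem.Dict.getD_eq_get?_getD, pvMapV_get?, hv]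
    simp only [Option.map_some, Option.getD_some]
    rw [← pvSum_append, pvMapV_insert]
  · simp only [hc, if_false, Bool.false_eq_true]
    have : pvBinit gb c = pvSum gb [c] := rfl
    rw [this, pvMapV_insert]

theorem pvFold_eq (gb : List String) (cs : List (List (String × String))) (d : PySem.Dict (List String) (List (List (String × String))))
    (h : ∀ p ∈ d.items, p.2 ≠ []) :
    cs.foldl (pvBstep gb) (pvMapV gb d) = pvMapV gb (cs.foldl (pvAstep gb) d) := by
  induction cs generalizing d with
  | nil => rfl
  | cons c cs ih =>
    simp only [List.foldl_cons]
    rw [pvStep_eq gb d c h]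
    exact ih _ (pvAstep_nonempty gb d c h)

theorem pvFoldA_nonempty (gb : List String) (cs : List (List (String × String))) (d : PySem.Dict (List String) (List (List (String × String))))
    (h : ∀ p ∈ d.items, p.2 ≠ []) : ∀ p ∈ (cs.foldl (pvAstep gb) d).items, p.2 ≠ [] := by
  induction cs generalizing d with
  | nil => exact h
  | cons c cs ih => exact ih _ (pvAstep_nonempty gb d c h)

theorem pvRow_eq (gb : List String) (c0 : List (String × String)) (rest : List (List (String × String))) :
    pvBrow gb (pvSum gb (c0 :: rest)) = pvArow gb (c0 :: rest) := by
  have hval : pvBval = pvAval := rfl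
  unfold pvBrow pvArow pvSum
  rw [pvSum_first, pvSum_count, pvSum_acc]
  simp only [pvBinit, List.headD_cons, List.map_map, Function.comp_def, List.foldl_map, hval]
  have hvals : ∀ col, List.foldl (fun s c => PySem.Set.add s (pvAval c col)) ([pvAval c0 col] : List String) rest
      = PySem.List.dedup ((c0 :: rest).map (fun c => pvAval c col)) := by
    intro col
    rw [PySem.List.dedup, PySem.Set.ofList_eq_foldl, List.foldl_map, List.foldl_cons]
    simp [PySem.Set.add]
  simp only [hvals]
  have hlen : (1 : Int) + (rest.length : Int) = (((c0 :: rest).length : Nat) : Int) := by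
    push_cast [List.length_cons]; ring
  rw [hlen]

-- ===== VERDICT (by name: the statement is the Claim_ definition above) =====
theorem group_entries_py_spec : Claim_equal_group_entries_py := by
  intro components group_by _dom _pre
  unfold Spec_group_entries_py
  cases group_by with
  | none => rfl
  | some gb =>
    simp only [group_entries_py, group_entries_py_alt]
    have hempty : (PySem.Dict.mk [] : PySem.Dict (List String) ((List (String × String)) × Int × PySem.Dict String (List String))) = pvMapV gb (PySem.Dict.mk []) := rfl
    rw [hempty, pvFold_eq gb components (PySem.Dict.mk []) (by simp)]
    have hnon := pvFoldA_nonempty gb components (PySem.Dict.mk []) (by simp)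
    unfold pvMapV
    rw [PySem.Dict.items]
    rw [List.foldl_map]
    refine (PySem.List.foldl_congr_mem _ _ _ _ ?_).symm
    intro acc kv hkv
    obtain ⟨c0, rest, hv⟩ : ∃ c0 rest, kv.2 = c0 :: rest := by
      cases hkv2 : kv.2 with
      | nil => exact absurd hkv2 (hnon kv hkv)
      | cons a b => exact ⟨a, b, rfl⟩
    rw [hv, pvRow_eq]
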